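-- pv_equiv track=rewrite | github.com/gatech-genemark/StartLink-exp | sbsp/code/python/lib/sbsp_alg/msa.py | add_stops_to_aa_alignment
-- ===== SOURCE A (Python) =====
-- def add_stops_to_aa_alignment(aa_alignment_no_stops, aa_sequence_with_stops):
--     # type: (str, str) -> str
--
--     pos_in_aa_sequence = 0
--
--     aa_alignment_with_stops = ""
--
--     for pos_in_aa_alignment in range(len(aa_alignment_no_stops)):
--
--         c_align = aa_alignment_no_stops[pos_in_aa_alignment]
--
--         # gaps
--         if c_align == "-":
--             aa_alignment_with_stops += "-"          # add gap
--             continue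
--
--         c_seq = aa_sequence_with_stops[pos_in_aa_sequence]
--
--         while c_seq == "*":
--             aa_alignment_with_stops += "*"
--             pos_in_aa_sequence += 1
--             c_seq = aa_sequence_with_stops[pos_in_aa_sequence]
--
--         if c_seq.upper() != c_align.upper():
--             raise ValueError("Sequences don't match...")
--
--         aa_alignment_with_stops += c_seq
--
--         pos_in_aa_sequence += 1
--
--     return aa_alignment_with_stops
-- ===== SOURCE B (Python) =====
-- def add_stops_to_aa_alignment(aa_alignment_no_stops, aa_sequence_with_stops):
--     # Tokenize once: each token is (preceding stars, residue); trailing stars drop.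
--     tokens = []
--     stars = ""
--     for ch in aa_sequence_with_stops:
--         if ch == '*':
--             stars += '*'
--         else:
--             tokens.append((stars, ch))
--             stars = ""
--     pieces = []
--     k = 0
--     for c in aa_alignment_no_stops:
--         if c == '-':
--             pieces.append('-')
--         else:
--             stars_k, res = tokens[k]   # IndexError when residues run out
--             if res.upper() != c.upper():
--                 raise ValueError("Sequences don't match...")
--             pieces.append(stars_k + res)
--             k += 1
--     return "".join(pieces)
-- ===== Notes on version B (the rewrite author's own statement) =====
-- stated objective: alternative
-- what changed: Replaces A's single scan with a sequence cursor and an inner star-skipping while loop by a two-phase decomposition: one pass tokenizes the stop sequence into (stars, residue) tokens, then the alignment is rebuilt by consuming tokens by index and joining pieces.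
import Mathlib
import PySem

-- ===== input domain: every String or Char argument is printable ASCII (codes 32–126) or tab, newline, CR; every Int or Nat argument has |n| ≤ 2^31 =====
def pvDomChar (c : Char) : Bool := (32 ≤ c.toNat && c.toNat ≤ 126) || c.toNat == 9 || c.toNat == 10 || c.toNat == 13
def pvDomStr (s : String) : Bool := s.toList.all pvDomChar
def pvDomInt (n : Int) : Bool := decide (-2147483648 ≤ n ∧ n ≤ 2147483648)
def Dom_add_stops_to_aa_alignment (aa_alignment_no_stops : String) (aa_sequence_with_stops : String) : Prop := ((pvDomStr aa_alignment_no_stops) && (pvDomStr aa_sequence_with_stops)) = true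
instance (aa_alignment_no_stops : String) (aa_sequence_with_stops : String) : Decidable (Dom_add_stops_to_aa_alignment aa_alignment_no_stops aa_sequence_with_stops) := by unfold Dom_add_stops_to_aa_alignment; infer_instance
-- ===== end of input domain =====

-- B replaces A's cursor-with-inner-while scan by a one-pass tokenization of the stop sequence
-- followed by indexed token consumption (alternative decomposition, same linear cost).


-- ===== PORT A =====
-- the inner `while c_seq == "*"` loop: skip stars (appending them to the accumulator),
-- return the first non-star residue and the remaining suffix; none = IndexError (outside Pre_)
def pvA_skip : List Char → List Char → Option (List Char × Char × List Char)
  | [], _ => none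
  | c :: rest, acc => if c = '*' then pvA_skip rest (acc ++ ['*']) else some (acc, c, rest)

-- the main `for pos_in_aa_alignment in range(...)` loop; the sequence cursor is the remaining suffix.
-- On the IndexError/ValueError paths (excluded by Pre_) it returns the accumulator so far.
def pvA_loop : List Char → List Char → List Char → List Char
  | [], _, acc => acc
  | c :: arest, rem, acc =>
    if c = '-' then pvA_loop arest rem (acc ++ ['-'])
    else
      match pvA_skip rem acc with
      | none => acc
      | some (acc', cseq, rem') =>
        if PySem.Chars.upperChar cseq ≠ PySem.Chars.upperChar c then acc'
        else pvA_loop arest rem' (acc' ++ [cseq])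

def add_stops_to_aa_alignment (aa_alignment_no_stops : String) (aa_sequence_with_stops : String) : String :=
  String.ofList (pvA_loop aa_alignment_no_stops.toList aa_sequence_with_stops.toList [])

-- ===== PORT B =====
-- first pass of Source B: tokens = list of (preceding stars, residue); trailing stars drop
def pvB_tokens : List Char → List Char → List (List Char × Char)
  | [], _ => []
  | c :: rest, stars =>
    if c = '*' then pvB_tokens rest (stars ++ ['*'])
    else (stars, c) :: pvB_tokens rest []

-- second pass of Source B: consume tokens in order; [] on the IndexError/ValueError paths (outside Pre_)
def pvB_build : List Char → List (List Char × Char) → List (List Char)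
  | [], _ => []
  | c :: arest, toks =>
    if c = '-' then ['-'] :: pvB_build arest toks
    else
      match toks with
      | [] => []
      | (stars, res) :: ts =>
        if PySem.Chars.upperChar res ≠ PySem.Chars.upperChar c then []
        else (stars ++ [res]) :: pvB_build arest ts

def add_stops_to_aa_alignment_alt (aa_alignment_no_stops : String) (aa_sequence_with_stops : String) : String :=
  String.ofList ((pvB_build aa_alignment_no_stops.toList (pvB_tokens aa_sequence_with_stops.toList [])).flatten)

-- ===== PRECONDITION & SPEC =====
-- Pre_ is exactly where the Python A returns: enough non-star residues in the sequence for the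
-- non-gap alignment columns (else IndexError) and a case-insensitive match on each (else ValueError).
def Pre_add_stops_to_aa_alignment (aa_alignment_no_stops : String) (aa_sequence_with_stops : String) : Prop :=
  (aa_alignment_no_stops.toList.filter (fun c => c ≠ '-')).length ≤ (aa_sequence_with_stops.toList.filter (fun c => c ≠ '*')).length ∧
  (aa_alignment_no_stops.toList.filter (fun c => c ≠ '-')).map PySem.Chars.upperChar =
    ((aa_sequence_with_stops.toList.filter (fun c => c ≠ '*')).take (aa_alignment_no_stops.toList.filter (fun c => c ≠ '-')).length).map PySem.Chars.upperChar

instance (aa_alignment_no_stops : String) (aa_sequence_with_stops : String) : Decidable (Pre_add_stops_to_aa_alignment aa_alignment_no_stops aa_sequence_with_stops) := by unfold Pre_add_stops_to_aa_alignment; infer_instance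

def pvWitness_add_stops_to_aa_alignment : String × String := ("AB-c", "*A*bC*")

def Spec_add_stops_to_aa_alignment (aa_alignment_no_stops : String) (aa_sequence_with_stops : String) (out : String) : Prop := out = add_stops_to_aa_alignment_alt aa_alignment_no_stops aa_sequence_with_stops
instance (aa_alignment_no_stops : String) (aa_sequence_with_stops : String) (out : String) : Decidable (Spec_add_stops_to_aa_alignment aa_alignment_no_stops aa_sequence_with_stops out) := by unfold Spec_add_stops_to_aa_alignment; infer_instance

-- ===== CLAIM (what is proved, stated in full; the proofs are below) =====
def Claim_equal_add_stops_to_aa_alignment : Prop := ∀ (aa_alignment_no_stops : String) (aa_sequence_with_stops : String), Dom_add_stops_to_aa_alignment aa_alignment_no_stops aa_sequence_with_stops → Pre_add_stops_to_aa_alignment aa_alignment_no_stops aa_sequence_with_stops → Spec_add_stops_to_aa_alignment aa_alignment_no_stops aa_sequence_with_stops (add_stops_to_aa_alignment aa_alignment_no_stops aa_sequence_with_stops)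

-- ===== LEMMAS AND PROOFS =====

-- A's star-skip and B's tokenizer walk the same suffix: either no residue remains (both fail),
-- or they peel the same stars `d` and residue `c`, leaving the same suffix.
lemma pv_skip_tok : ∀ (rem acc pre : List Char),
    (pvA_skip rem acc = none ∧ pvB_tokens rem pre = [] ∧ rem.filter (fun x => x ≠ '*') = []) ∨
    (∃ d c rem', pvA_skip rem acc = some (acc ++ d, c, rem') ∧
      pvB_tokens rem pre = (pre ++ d, c) :: pvB_tokens rem' [] ∧
      rem.filter (fun x => x ≠ '*') = c :: rem'.filter (fun x => x ≠ '*')) := by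
  intro rem
  induction rem with
  | nil => intro acc pre; left; simp [pvA_skip, pvB_tokens]
  | cons c rest ih =>
    intro acc pre
    by_cases hc : c = '*'
    · subst hc
      rcases ih (acc ++ ['*']) (pre ++ ['*']) with ⟨h1, h2, h3⟩ | ⟨d, c0, rem', h1, h2, h3⟩
      · left
        have hf : List.filter (fun x => decide (x ≠ '*')) ('*' :: rest) =
            List.filter (fun x => decide (x ≠ '*')) rest := List.filter_cons_of_neg (by simp)
        exact ⟨by simpa [pvA_skip] using h1, by simpa [pvB_tokens] using h2, by rw [hf]; exact h3⟩
      · right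
        exact ⟨'*' :: d, c0, rem', by simpa [pvA_skip, List.append_assoc] using h1,
          by simpa [pvB_tokens, List.append_assoc] using h2, by simpa using h3⟩
    · right
      exact ⟨[], c, rest, by simp [pvA_skip, hc], by simp [pvB_tokens, hc], by simp [hc]⟩

lemma pv_main : ∀ (align rem acc : List Char),
    (align.filter (fun c => c ≠ '-')).length ≤ (rem.filter (fun c => c ≠ '*')).length →
    (align.filter (fun c => c ≠ '-')).map PySem.Chars.upperChar =
      ((rem.filter (fun c => c ≠ '*')).take (align.filter (fun c => c ≠ '-')).length).map PySem.Chars.upperChar →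
    pvA_loop align rem acc = acc ++ (pvB_build align (pvB_tokens rem [])).flatten := by
  intro align
  induction align with
  | nil => intro rem acc _ _; simp [pvA_loop, pvB_build]
  | cons c arest ih =>
    intro rem acc hlen hmap
    by_cases hgap : c = '-'
    · subst hgap
      simp only [pvA_loop, pvB_build]
      rw [ih rem (acc ++ ['-']) (by simpa using hlen) (by simpa using hmap)]
      simp
    · have hfil : (c :: arest).filter (fun x => x ≠ '-') = c :: arest.filter (fun x => x ≠ '-') := by
        simp [hgap]
      rcases pv_skip_tok rem acc [] with ⟨_, _, h3⟩ | ⟨d, c0, rem', h1, h2, h3⟩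
      · exfalso
        rw [hfil, h3] at hlen
        simp at hlen
      · rw [hfil, h3] at hlen hmap
        simp only [List.length_cons] at hlen
        simp only [List.length_cons, List.take_succ_cons, List.map_cons, List.cons.injEq] at hmap
        obtain ⟨hup, htail⟩ := hmap
        have hups : ¬ (PySem.Chars.upperChar c0 ≠ PySem.Chars.upperChar c) := by
          simp [hup]
        simp only [pvA_loop, pvB_build, if_neg hgap, h1, h2, List.nil_append, if_neg hups]
        rw [ih rem' (acc ++ d ++ [c0]) (by omega) htail]
        simp

-- ===== VERDICT (by name: the statement is the Claim_ definition above) =====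
theorem add_stops_to_aa_alignment_spec : Claim_equal_add_stops_to_aa_alignment := by
  intro a s _ hpre
  unfold Spec_add_stops_to_aa_alignment add_stops_to_aa_alignment add_stops_to_aa_alignment_alt
  rw [pv_main a.toList s.toList [] hpre.1 hpre.2]
  simp
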